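-- pv_equiv track=rewrite | github.com/jk53542/HASHIRU_Bench | bench/analyze_se_trace_multiagent_reprompt.py | table_two_way
-- ===== SOURCE A (Python) =====
-- def table_two_way(
--     rows: dict[str, dict[str, int]],
--     title: str,
--     row_labels: list[str],
-- ) -> str:
--     lines = [
--         f"### {title}",
--         "",
--         "| Category | Correct | Incorrect | Total |",
--         "|---|---:|---:|---:|",
--     ]
--     for key in row_labels:
--         c = rows.get(key, {"correct": 0, "incorrect": 0})
--         tot = c.get("correct", 0) + c.get("incorrect", 0)
--         lines.append(
--             f"| {key} | {c.get('correct', 0)} | {c.get('incorrect', 0)} | {tot} |"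
--         )
--     tc = sum(rows[k].get("correct", 0) for k in row_labels if k in rows)
--     ti = sum(rows[k].get("incorrect", 0) for k in row_labels if k in rows)
--     tt = tc + ti
--     lines.append(f"| **All aligned** | **{tc}** | **{ti}** | **{tt}** |")
--     return "\n".join(lines)
-- ===== SOURCE B (Python) =====
-- def table_two_way(
--     rows: dict[str, dict[str, int]],
--     title: str,
--     row_labels: list[str],
-- ) -> str:
--     body = []
--     tc = 0
--     ti = 0
--     for key in row_labels:
--         c = rows.get(key, {})
--         cc = c.get("correct", 0)
--         ci = c.get("incorrect", 0)
--         body.append(f"| {key} | {cc} | {ci} | {cc + ci} |")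
--         tc += cc
--         ti += ci
--     return "\n".join(
--         [
--             f"### {title}",
--             "",
--             "| Category | Correct | Incorrect | Total |",
--             "|---|---:|---:|---:|",
--         ]
--         + body
--         + [f"| **All aligned** | **{tc}** | **{ti}** | **{tc + ti}** |"]
--     )
-- ===== Notes on version B (the rewrite author's own statement) =====
-- stated objective: simpler
-- what changed: B builds the table in a single pass over row_labels, accumulating the running totals tc/ti while emitting each row line, instead of A's loop plus two separate sum-comprehension scans over row_labels with membership tests.
import Mathlib
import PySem

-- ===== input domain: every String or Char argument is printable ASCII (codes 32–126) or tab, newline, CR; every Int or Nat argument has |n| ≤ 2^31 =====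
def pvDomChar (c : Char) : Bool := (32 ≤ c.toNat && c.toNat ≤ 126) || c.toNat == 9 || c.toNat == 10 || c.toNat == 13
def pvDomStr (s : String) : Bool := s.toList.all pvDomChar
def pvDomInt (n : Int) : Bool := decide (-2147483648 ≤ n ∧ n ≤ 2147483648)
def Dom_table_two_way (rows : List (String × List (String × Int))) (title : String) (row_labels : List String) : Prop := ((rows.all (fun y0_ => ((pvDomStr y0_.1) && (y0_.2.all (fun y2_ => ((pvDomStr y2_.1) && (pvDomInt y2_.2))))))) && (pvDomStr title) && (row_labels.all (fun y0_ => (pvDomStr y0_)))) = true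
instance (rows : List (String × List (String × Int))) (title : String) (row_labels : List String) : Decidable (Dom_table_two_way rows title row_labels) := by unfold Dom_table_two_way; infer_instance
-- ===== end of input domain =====

-- B builds the table in a single pass accumulating the totals while emitting each row,
-- instead of A's loop plus two separate sum-comprehension scans; same output (objective: simpler).

-- shared .get helpers (Python dict.get: first-matching key, else default)
def pvRowsGet : List (String × List (String × Int)) → String → Option (List (String × Int))
  | [], _ => none
  | (k, v) :: rest, key => if k == key then some v else pvRowsGet rest key

def pvGetD : List (String × Int) → String → Int → Int
  | [], _, d => d
  | (k, v) :: rest, key, d => if k == key then v else pvGetD rest key d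

-- ===== PORT A =====
def table_two_way (rows : List (String × List (String × Int))) (title : String) (row_labels : List String) : String :=
  let lines : List String :=
    ["### " ++ title, "",
     "| Category | Correct | Incorrect | Total |",
     "|---|---:|---:|---:|"]
  let lines := row_labels.foldl (fun ls key =>
      let c := (pvRowsGet rows key).getD [("correct", 0), ("incorrect", 0)]
      let tot := pvGetD c "correct" 0 + pvGetD c "incorrect" 0
      ls ++ ["| " ++ key ++ " | " ++ PySem.Int.toStr (pvGetD c "correct" 0) ++ " | "
              ++ PySem.Int.toStr (pvGetD c "incorrect" 0) ++ " | " ++ PySem.Int.toStr tot ++ " |"])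
    lines
  let tc := (row_labels.filter (fun k => (pvRowsGet rows k).isSome)).foldl
      (fun a k => a + pvGetD ((pvRowsGet rows k).getD []) "correct" 0) 0
  let ti := (row_labels.filter (fun k => (pvRowsGet rows k).isSome)).foldl
      (fun a k => a + pvGetD ((pvRowsGet rows k).getD []) "incorrect" 0) 0
  let tt := tc + ti
  let lines := lines ++ ["| **All aligned** | **" ++ PySem.Int.toStr tc ++ "** | **"
                          ++ PySem.Int.toStr ti ++ "** | **" ++ PySem.Int.toStr tt ++ "** |"]
  PySem.Str.join "\n" lines

-- ===== PORT B =====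
def table_two_way_alt (rows : List (String × List (String × Int))) (title : String) (row_labels : List String) : String :=
  let st := row_labels.foldl (fun st key =>
      let c := (pvRowsGet rows key).getD []
      let cc := pvGetD c "correct" 0
      let ci := pvGetD c "incorrect" 0
      (st.1 ++ ["| " ++ key ++ " | " ++ PySem.Int.toStr cc ++ " | " ++ PySem.Int.toStr ci
                 ++ " | " ++ PySem.Int.toStr (cc + ci) ++ " |"],
       st.2.1 + cc, st.2.2 + ci))
    (([] : List String), (0 : Int), (0 : Int))
  PySem.Str.join "\n"
    (["### " ++ title, "",
      "| Category | Correct | Incorrect | Total |",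
      "|---|---:|---:|---:|"]
     ++ st.1
     ++ ["| **All aligned** | **" ++ PySem.Int.toStr st.2.1 ++ "** | **"
          ++ PySem.Int.toStr st.2.2 ++ "** | **" ++ PySem.Int.toStr (st.2.1 + st.2.2) ++ "** |"])

-- ===== PRECONDITION & SPEC =====
def Spec_table_two_way (rows : List (String × List (String × Int))) (title : String) (row_labels : List String) (out : String) : Prop := out = table_two_way_alt rows title row_labels
instance (rows : List (String × List (String × Int))) (title : String) (row_labels : List String) (out : String) : Decidable (Spec_table_two_way rows title row_labels out) := by unfold Spec_table_two_way; infer_instance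

-- ===== CLAIM (what is proved, stated in full; the proofs are below) =====
def Claim_equal_table_two_way : Prop := ∀ (rows : List (String × List (String × Int))) (title : String) (row_labels : List String), Dom_table_two_way rows title row_labels → Spec_table_two_way rows title row_labels (table_two_way rows title row_labels)

-- ===== LEMMAS AND PROOFS =====

-- per-key count extractors (B's view; A's defaults give the same values)
def pvCC (rows : List (String × List (String × Int))) (k : String) : Int :=
  pvGetD ((pvRowsGet rows k).getD []) "correct" 0

def pvCI (rows : List (String × List (String × Int))) (k : String) : Int :=
  pvGetD ((pvRowsGet rows k).getD []) "incorrect" 0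

def pvLine (rows : List (String × List (String × Int))) (key : String) : String :=
  "| " ++ key ++ " | " ++ PySem.Int.toStr (pvCC rows key) ++ " | " ++ PySem.Int.toStr (pvCI rows key)
    ++ " | " ++ PySem.Int.toStr (pvCC rows key + pvCI rows key) ++ " |"

-- A's row fold produces the same lines: the missing-key default dict yields counts 0 = B's empty default
lemma foldA_spec (rows : List (String × List (String × Int))) :
    ∀ (labels : List String) (ls : List String),
      labels.foldl (fun ls key =>
        let c := (pvRowsGet rows key).getD [("correct", 0), ("incorrect", 0)]
        let tot := pvGetD c "correct" 0 + pvGetD c "incorrect" 0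
        ls ++ ["| " ++ key ++ " | " ++ PySem.Int.toStr (pvGetD c "correct" 0) ++ " | "
                ++ PySem.Int.toStr (pvGetD c "incorrect" 0) ++ " | " ++ PySem.Int.toStr tot ++ " |"]) ls
      = ls ++ labels.map (pvLine rows) := by
  intro labels
  induction labels with
  | nil => intro ls; simp
  | cons k ks ih =>
    intro ls
    simp only [List.foldl_cons, List.map_cons, ih]
    have hline : ∀ (c₀ : List (String × Int)), (pvRowsGet rows k).getD [("correct", 0), ("incorrect", 0)] = c₀ →
        ("| " ++ k ++ " | " ++ PySem.Int.toStr (pvGetD c₀ "correct" 0) ++ " | "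
          ++ PySem.Int.toStr (pvGetD c₀ "incorrect" 0) ++ " | "
          ++ PySem.Int.toStr (pvGetD c₀ "correct" 0 + pvGetD c₀ "incorrect" 0) ++ " |")
        = pvLine rows k := by
      intro c₀ hc
      cases h : pvRowsGet rows k with
      | none =>
        rw [h] at hc
        simp only [Option.getD_none] at hc
        subst hc
        simp [pvLine, pvCC, pvCI, pvGetD, h]
      | some c =>
        rw [h] at hc
        simp only [Option.getD_some] at hc
        subst hc
        simp [pvLine, pvCC, pvCI, h]
    rw [hline _ rfl]
    simp

-- B's single fold = (row lines, total correct, total incorrect)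
lemma foldB_spec (rows : List (String × List (String × Int))) :
    ∀ (labels : List String) (body : List String) (tc ti : Int),
      labels.foldl (fun st key =>
        let c := (pvRowsGet rows key).getD []
        let cc := pvGetD c "correct" 0
        let ci := pvGetD c "incorrect" 0
        (st.1 ++ ["| " ++ key ++ " | " ++ PySem.Int.toStr cc ++ " | " ++ PySem.Int.toStr ci
                   ++ " | " ++ PySem.Int.toStr (cc + ci) ++ " |"],
         st.2.1 + cc, st.2.2 + ci)) (body, tc, ti)
      = (body ++ labels.map (pvLine rows),
         tc + (labels.map (pvCC rows)).sum,
         ti + (labels.map (pvCI rows)).sum) := by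
  intro labels
  induction labels with
  | nil => intro body tc ti; simp
  | cons k ks ih =>
    intro body tc ti
    simp only [List.foldl_cons, List.map_cons, ih, List.sum_cons]
    refine Prod.ext ?_ (Prod.ext ?_ ?_) <;> simp [pvLine, pvCC, pvCI] <;> ring

-- A's filtered running sum equals the full-list sum (absent keys contribute 0)
lemma filter_sum (rows : List (String × List (String × Int))) (fld : String) :
    ∀ (labels : List String) (a : Int),
      (labels.filter (fun k => (pvRowsGet rows k).isSome)).foldl
        (fun a k => a + pvGetD ((pvRowsGet rows k).getD []) fld 0) a
      = a + (labels.map (fun k => pvGetD ((pvRowsGet rows k).getD []) fld 0)).sum := by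
  intro labels
  induction labels with
  | nil => intro a; simp
  | cons k ks ih =>
    intro a
    by_cases h : (pvRowsGet rows k).isSome
    · rw [List.filter_cons_of_pos (by simpa using h)]
      simp only [List.foldl_cons, List.map_cons, List.sum_cons, ih]
      ring
    · rw [List.filter_cons_of_neg (by simpa using h)]
      have h0 : pvGetD ((pvRowsGet rows k).getD []) fld 0 = 0 := by
        rw [Option.not_isSome_iff_eq_none.mp h]; simp [pvGetD]
      simp [ih, h0]

-- ===== VERDICT (by name: the statement is the Claim_ definition above) =====
theorem table_two_way_spec : Claim_equal_table_two_way := by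
  intro rows title row_labels _
  show _ = _
  simp only [table_two_way, table_two_way_alt]
  rw [foldA_spec rows row_labels, foldB_spec rows row_labels,
      filter_sum rows "correct" row_labels, filter_sum rows "incorrect" row_labels]
  unfold pvCC pvCI
  simp
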